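-- pv_equiv track=rewrite | github.com/UOR-Foundation/factorizer | .archive/prime_resonator/phase1_final.py | _is_near_special_form
-- ===== SOURCE A (Python) =====
-- def _is_near_special_form(pos: int) -> bool:
--     """Check if position is near a special form"""
--     # Check Fermat
--     for k in range(20):
--         fermat = (1 << (1 << k)) + 1
--         if abs(pos - fermat) < 10:
--             return True
--         if fermat > pos + 10:
--             break
--
--     # Check Mersenne
--     for p in range(2, 64):
--         mersenne = (1 << p) - 1
--         if abs(pos - mersenne) < 10:
--             return True
--         if mersenne > pos + 10:
--             break
--
--     return False
-- ===== SOURCE B (Python) =====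
-- def _pow2_exp(n):
--     """Exponent p with n == 2**p, or None if n is not a power of two."""
--     p = 0
--     while n > 1 and n % 2 == 0:
--         n //= 2
--         p += 1
--     return p if n == 1 else None
--
--
-- def _is_near_special_form(pos: int) -> bool:
--     """Check if position is near a special form"""
--     for c in range(pos - 9, pos + 10):
--         p = _pow2_exp(c + 1)
--         if p is not None and 2 <= p <= 63:
--             return True  # Mersenne: c == 2**p - 1
--         e = _pow2_exp(c - 1)
--         if e is not None:
--             k = _pow2_exp(e)
--             if k is not None and k <= 19:
--                 return True  # Fermat: c == 2**(2**k) + 1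
--     return False
-- ===== Notes on version B (the rewrite author's own statement) =====
-- stated objective: alternative
-- what changed: Instead of enumerating the Fermat/Mersenne numbers and comparing each to pos with an early break, B scans the nineteen candidate values around pos and classifies each candidate directly, by an exact integer factor-out-twos test, as a Mersenne number (candidate plus one is a power of two with exponent in A's Mersenne range) or a Fermat number (candidate minus one is a power of two whose exponent is itself a power of two within A's Fermat range).
import Mathlib
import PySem

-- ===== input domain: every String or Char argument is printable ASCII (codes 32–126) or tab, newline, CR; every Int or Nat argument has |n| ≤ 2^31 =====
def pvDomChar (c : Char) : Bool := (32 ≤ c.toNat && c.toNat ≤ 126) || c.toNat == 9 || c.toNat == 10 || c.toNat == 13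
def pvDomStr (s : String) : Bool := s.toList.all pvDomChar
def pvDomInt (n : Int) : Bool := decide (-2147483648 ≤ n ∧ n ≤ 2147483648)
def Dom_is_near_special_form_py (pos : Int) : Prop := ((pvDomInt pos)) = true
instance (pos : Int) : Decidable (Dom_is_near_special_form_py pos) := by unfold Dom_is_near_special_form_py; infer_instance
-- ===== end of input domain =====

-- B replaces A's enumerate-special-numbers-and-compare loops by a scan of the 19
-- candidates around pos, classifying each candidate by exact integer power-of-two
-- factor-out tests (objective: alternative algorithm, same cost).


-- ===== PORT A =====
-- Both of A's loops share the shape "for x in range: v = f(x); if |pos-v|<10: return True;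
-- if v > pos+10: break"; scanLoop is that loop, parameterised by f (1 << n = 2^n).
def scanLoop (pos : Int) (f : Int → Int) : List Int → Bool
  | [] => false
  | x :: xs =>
    let v := f x
    if (pos - v).natAbs < 10 then true
    else if v > pos + 10 then false
    else scanLoop pos f xs

def is_near_special_form_py (pos : Int) : Bool :=
  -- Check Fermat: fermat = (1 << (1 << k)) + 1, k in range(20); return True short-circuits
  scanLoop pos (fun k => (2 : Int) ^ ((2 : Nat) ^ k.toNat) + 1) (PySem.List.pyRange 0 20 1)
  ||
  -- Check Mersenne: mersenne = (1 << p) - 1, p in range(2, 64)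
  scanLoop pos (fun p => (2 : Int) ^ p.toNat - 1) (PySem.List.pyRange 2 64 1)

-- ===== PORT B =====
-- _pow2_exp's while loop, run on n.toNat: exact for every Int input, since for n ≤ 0
-- Python's loop body never runs and it returns None (and toNat sends n ≤ 0 to 0 → none).
def pow2ExpAux : Nat → Nat → Option Nat
  | n, p =>
    if h : 1 < n ∧ n % 2 = 0 then pow2ExpAux (n / 2) (p + 1)
    else if n = 1 then some p else none
  termination_by n _ => n
  decreasing_by omega

def pow2Exp (n : Int) : Option Nat := pow2ExpAux n.toNat 0

-- the two "p is not None and …" tests of B's loop body, one per special form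
def mersenneTest2 : Option Nat → Bool
  | some p => decide (2 ≤ p ∧ p ≤ 63)
  | none => false

def fermatTest3 : Option Nat → Bool
  | some k => decide (k ≤ 19)
  | none => false

def fermatTest2 : Option Nat → Bool
  | some e => fermatTest3 (pow2Exp (e : Int))
  | none => false

def specialCheck (c : Int) : Bool :=
  mersenneTest2 (pow2Exp (c + 1)) || fermatTest2 (pow2Exp (c - 1))

def is_near_special_form_py_alt (pos : Int) : Bool :=
  (PySem.List.pyRange (pos - 9) (pos + 10) 1).any specialCheck

-- ===== PRECONDITION & SPEC =====
def Spec_is_near_special_form_py (pos : Int) (out : Bool) : Prop := out = is_near_special_form_py_alt pos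
instance (pos : Int) (out : Bool) : Decidable (Spec_is_near_special_form_py pos out) := by unfold Spec_is_near_special_form_py; infer_instance

-- ===== CLAIM (what is proved, stated in full; the proofs are below) =====
def Claim_equal_is_near_special_form_py : Prop := ∀ (pos : Int), Dom_is_near_special_form_py pos → Spec_is_near_special_form_py pos (is_near_special_form_py pos)

-- ===== LEMMAS AND PROOFS =====

-- The break never changes the result when f is monotone along the list.
theorem scanLoop_eq_any (pos : Int) (f : Int → Int) :
    ∀ (l : List Int), l.Pairwise (fun a b => f a ≤ f b) →
      scanLoop pos f l = l.any (fun x => decide ((pos - f x).natAbs < 10)) := by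
  intro l
  induction l with
  | nil => intro _; rfl
  | cons a xs ih =>
    intro hp
    rw [List.pairwise_cons] at hp
    obtain ⟨hall, htail⟩ := hp
    by_cases hhit : (pos - f a).natAbs < 10
    · simp [scanLoop, hhit]
    · by_cases hbrk : f a > pos + 10
      · have : xs.any (fun x => decide ((pos - f x).natAbs < 10)) = false := by
          rw [List.any_eq_false]
          intro x hx
          have := hall x hx
          simp only [decide_eq_true_eq]
          omega
        simp [scanLoop, hhit, hbrk, this]
      · simp [scanLoop, hhit, hbrk, ih htail]

theorem pow2ExpAux_eq_some (n : Nat) :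
    ∀ p q : Nat, pow2ExpAux n p = some q ↔ p ≤ q ∧ n = 2 ^ (q - p) := by
  induction n using Nat.strong_induction_on with
  | _ n ih =>
    intro p q
    rw [pow2ExpAux]
    by_cases h : 1 < n ∧ n % 2 = 0
    · rw [dif_pos h]
      rw [ih (n / 2) (by omega) (p + 1) q]
      constructor
      · rintro ⟨h1, h2⟩
        refine ⟨by omega, ?_⟩
        have hq : q - p = (q - (p + 1)) + 1 := by omega
        rw [hq, pow_succ]
        omega
      · rintro ⟨h1, h2⟩
        have hne : q ≠ p := by
          rintro rfl
          simp at h2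
          omega
        refine ⟨by omega, ?_⟩
        have hq : q - p = (q - (p + 1)) + 1 := by omega
        rw [hq, pow_succ] at h2
        omega
    · rw [dif_neg h]
      by_cases h1 : n = 1
      · subst h1
        rw [if_pos rfl]
        constructor
        · intro hq
          injection hq with hq
          subst hq
          simp
        · rintro ⟨hle, h2⟩
          have hz : q - p = 0 := by
            by_contra hq
            have : 2 ^ (q - p) ≥ 2 ^ 1 := Nat.pow_le_pow_right (by omega) (by omega)
            omega
          congr 1
          omega
      · rw [if_neg h1]
        constructor
        · intro hc; exact absurd hc (by simp)
        · rintro ⟨hle, h2⟩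
          rcases Nat.eq_zero_or_pos (q - p) with hz | hpos
          · rw [hz] at h2; simp at h2; omega
          · have heven : 2 ^ (q - p) % 2 = 0 := by
              have hq : q - p = (q - p - 1) + 1 := by omega
              rw [hq, pow_succ]
              omega
            have hge : 2 ^ (q - p) ≥ 2 ^ 1 := Nat.pow_le_pow_right (by omega) (by omega)
            omega

theorem pow2Exp_eq_some (n : Int) (p : Nat) :
    pow2Exp n = some p ↔ n = 2 ^ p := by
  unfold pow2Exp
  rw [pow2ExpAux_eq_some]
  rw [Nat.sub_zero]
  constructor
  · rintro ⟨_, h2⟩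
    have hn : 0 ≤ n := by
      by_contra hneg
      rw [Int.toNat_of_nonpos (by omega)] at h2
      exact absurd h2.symm (by positivity)
    calc n = (n.toNat : Int) := (Int.toNat_of_nonneg hn).symm
      _ = ((2 ^ p : Nat) : Int) := by rw [h2]
      _ = 2 ^ p := by push_cast; ring
  · rintro rfl
    refine ⟨Nat.zero_le p, ?_⟩
    rw [show (2 : Int) ^ p = ((2 ^ p : Nat) : Int) from by push_cast; ring]
    exact Int.toNat_natCast _

theorem specialCheck_eq_true (c : Int) :
    specialCheck c = true ↔
      (∃ p : Nat, 2 ≤ p ∧ p ≤ 63 ∧ c = 2 ^ p - 1) ∨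
      (∃ k : Nat, k ≤ 19 ∧ c = 2 ^ ((2 : Nat) ^ k) + 1) := by
  unfold specialCheck
  rw [Bool.or_eq_true]
  constructor
  · rintro (h | h)
    · left
      rcases hm : pow2Exp (c + 1) with _ | p
      · rw [hm] at h; exact absurd h (by simp [mersenneTest2])
      · rw [hm] at h
        simp only [mersenneTest2, decide_eq_true_eq] at h
        rw [pow2Exp_eq_some] at hm
        exact ⟨p, h.1, h.2, by omega⟩
    · right
      rcases hm : pow2Exp (c - 1) with _ | e
      · rw [hm] at h; exact absurd h (by simp [fermatTest2])
      · rw [hm] at h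
        simp only [fermatTest2] at h
        rcases hk : pow2Exp (e : Int) with _ | k
        · rw [hk] at h; exact absurd h (by simp [fermatTest3])
        · rw [hk] at h
          simp only [fermatTest3, decide_eq_true_eq] at h
          rw [pow2Exp_eq_some] at hm hk
          refine ⟨k, h, ?_⟩
          have he : e = 2 ^ k := by exact_mod_cast hk
          rw [he] at hm
          omega
  · rintro (⟨p, h2, h63, hc⟩ | ⟨k, h19, hc⟩)
    · left
      have hm : pow2Exp (c + 1) = some p := by rw [pow2Exp_eq_some]; omega
      rw [hm]
      simp [mersenneTest2, h2, h63]
    · right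
      have hm : pow2Exp (c - 1) = some ((2 : Nat) ^ k) := by
        rw [pow2Exp_eq_some]
        omega
      rw [hm]
      simp only [fermatTest2]
      have hk : pow2Exp (((2 : Nat) ^ k : Nat) : Int) = some k := by
        rw [pow2Exp_eq_some]; push_cast; ring
      rw [hk]
      simp [fermatTest3, h19]

theorem fermat_mono :
    (PySem.List.pyRange 0 20 1).Pairwise
      (fun a b => (2 : Int) ^ ((2 : Nat) ^ a.toNat) + 1 ≤ (2 : Int) ^ ((2 : Nat) ^ b.toNat) + 1) := by
  refine (PySem.List.pairwise_lt_pyRange_one 0 20).imp ?_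
  intro a b hab
  have h1 : (2 : Nat) ^ a.toNat ≤ (2 : Nat) ^ b.toNat :=
    Nat.pow_le_pow_right (by omega) (by omega)
  have := pow_le_pow_right₀ (by omega : (1 : Int) ≤ 2) h1
  omega

theorem mersenne_mono :
    (PySem.List.pyRange 2 64 1).Pairwise
      (fun a b => (2 : Int) ^ a.toNat - 1 ≤ (2 : Int) ^ b.toNat - 1) := by
  refine (PySem.List.pairwise_lt_pyRange_one 2 64).imp ?_
  intro a b hab
  have := pow_le_pow_right₀ (by omega : (1 : Int) ≤ 2) (by omega : a.toNat ≤ b.toNat)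
  omega

theorem a_eq_true (pos : Int) :
    is_near_special_form_py pos = true ↔
      (∃ k : Int, 0 ≤ k ∧ k < 20 ∧ (pos - ((2 : Int) ^ ((2 : Nat) ^ k.toNat) + 1)).natAbs < 10) ∨
      (∃ p : Int, 2 ≤ p ∧ p < 64 ∧ (pos - ((2 : Int) ^ p.toNat - 1)).natAbs < 10) := by
  unfold is_near_special_form_py
  rw [scanLoop_eq_any pos _ _ fermat_mono, scanLoop_eq_any pos _ _ mersenne_mono]
  rw [Bool.or_eq_true, List.any_eq_true, List.any_eq_true]
  constructor
  · rintro (⟨k, hk, hd⟩ | ⟨p, hp, hd⟩)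
    · rw [PySem.List.mem_pyRange_one] at hk
      exact Or.inl ⟨k, hk.1, hk.2, by simpa using hd⟩
    · rw [PySem.List.mem_pyRange_one] at hp
      exact Or.inr ⟨p, hp.1, hp.2, by simpa using hd⟩
  · rintro (⟨k, h0, h20, hd⟩ | ⟨p, h2, h64, hd⟩)
    · exact Or.inl ⟨k, PySem.List.mem_pyRange_one.mpr ⟨h0, h20⟩, by simpa using hd⟩
    · exact Or.inr ⟨p, PySem.List.mem_pyRange_one.mpr ⟨h2, h64⟩, by simpa using hd⟩

theorem b_eq_true (pos : Int) :
    is_near_special_form_py_alt pos = true ↔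
      ∃ c : Int, pos - 9 ≤ c ∧ c < pos + 10 ∧ specialCheck c = true := by
  unfold is_near_special_form_py_alt
  rw [List.any_eq_true]
  constructor
  · rintro ⟨c, hc, hs⟩
    rw [PySem.List.mem_pyRange_one] at hc
    exact ⟨c, hc.1, hc.2, hs⟩
  · rintro ⟨c, h1, h2, hs⟩
    exact ⟨c, PySem.List.mem_pyRange_one.mpr ⟨h1, h2⟩, hs⟩

theorem main_iff (pos : Int) :
    is_near_special_form_py pos = is_near_special_form_py_alt pos := by
  rw [Bool.eq_iff_iff, a_eq_true, b_eq_true]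
  constructor
  · rintro (⟨k, h0, h20, hd⟩ | ⟨p, h2, h64, hd⟩)
    · refine ⟨(2 : Int) ^ ((2 : Nat) ^ k.toNat) + 1, by omega, by omega, ?_⟩
      rw [specialCheck_eq_true]
      exact Or.inr ⟨k.toNat, by omega, by ring⟩
    · refine ⟨(2 : Int) ^ p.toNat - 1, by omega, by omega, ?_⟩
      rw [specialCheck_eq_true]
      exact Or.inl ⟨p.toNat, by omega, by omega, by ring⟩
  · rintro ⟨c, h1, h2, hs⟩
    rw [specialCheck_eq_true] at hs
    rcases hs with ⟨p, hp2, hp63, hc⟩ | ⟨k, hk19, hc⟩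
    · refine Or.inr ⟨(p : Int), by omega, by omega, ?_⟩
      rw [Int.toNat_natCast]
      omega
    · refine Or.inl ⟨(k : Int), by omega, by omega, ?_⟩
      rw [Int.toNat_natCast]
      omega

-- ===== VERDICT (by name: the statement is the Claim_ definition above) =====
theorem is_near_special_form_py_spec : Claim_equal_is_near_special_form_py := by
  intro pos _
  unfold Spec_is_near_special_form_py
  exact main_iff pos
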